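-- pv_equiv track=rewrite | github.com/dandan1200/MatrixTraversal1110 | Matrix_traversal.py | times_table
-- ===== SOURCE A (Python) =====
-- def times_table(n):
--     ls = []
--     for x in range(1,n+1):
--         row = []
--         for y in range(1,n+1):
--             row.append(x*y)
--         ls.append(row)
--     return ls
-- ===== SOURCE B (Python) =====
-- def times_table(n):
--     base = list(range(1, n + 1))
--     prev = [0] * len(base)
--     ls = []
--     for _ in range(n):
--         prev = [p + b for p, b in zip(prev, base)]
--         ls.append(prev)
--     return ls
-- ===== Notes on version B (the rewrite author's own statement) =====
-- stated objective: alternative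
-- what changed: B computes the first row once and builds each subsequent row by elementwise vector addition of the base row to the previous row, instead of recomputing x*y in a nested loop.
import Mathlib
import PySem

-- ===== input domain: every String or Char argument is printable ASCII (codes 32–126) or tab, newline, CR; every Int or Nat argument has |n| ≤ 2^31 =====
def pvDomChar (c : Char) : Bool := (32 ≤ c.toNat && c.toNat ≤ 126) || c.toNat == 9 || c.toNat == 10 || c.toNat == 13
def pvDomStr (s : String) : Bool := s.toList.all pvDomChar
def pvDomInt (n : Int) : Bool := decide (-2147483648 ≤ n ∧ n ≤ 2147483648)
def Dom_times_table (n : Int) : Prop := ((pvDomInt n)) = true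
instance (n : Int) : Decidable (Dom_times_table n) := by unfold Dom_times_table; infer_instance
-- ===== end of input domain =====

-- B builds each row from the previous one by adding the base row (repeated vector addition)
-- instead of A's nested loop computing x*y independently; same O(n^2) cost, different decomposition.

-- ===== PORT A =====
def times_table (n : Int) : List (List Int) :=
  (PySem.List.pyRange 1 (n + 1) 1).foldl
    (fun ls x =>
      ls ++ [(PySem.List.pyRange 1 (n + 1) 1).foldl (fun row y => row ++ [x * y]) []])
    []

-- ===== PORT B =====
def times_table_alt (n : Int) : List (List Int) :=
  let base := PySem.List.pyRange 1 (n + 1) 1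
  ((PySem.List.pyRange 0 n 1).foldl
    (fun (st : List (List Int) × List Int) _ =>
      let next := st.2.zipWith (fun p b => p + b) base
      (st.1 ++ [next], next))
    ([], List.replicate base.length 0)).1

-- ===== PRECONDITION & SPEC =====
def Spec_times_table (n : Int) (out : List (List Int)) : Prop := out = times_table_alt n
instance (n : Int) (out : List (List Int)) : Decidable (Spec_times_table n out) := by unfold Spec_times_table; infer_instance

-- ===== CLAIM (what is proved, stated in full; the proofs are below) =====
def Claim_equal_times_table : Prop := ∀ (n : Int), Dom_times_table n → Spec_times_table n (times_table n)

-- ===== LEMMAS AND PROOFS =====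

lemma foldl_snoc_map (xs : List Int) (f : Int → Int) (acc : List Int) :
    xs.foldl (fun row y => row ++ [f y]) acc = acc ++ xs.map f := by
  induction xs generalizing acc with
  | nil => simp
  | cons y ys ih => simp [List.foldl_cons, ih]

lemma timesA_eq (n : Int) :
    times_table n =
      (PySem.List.pyRange 1 (n + 1) 1).map
        (fun x => (PySem.List.pyRange 1 (n + 1) 1).map (fun y => x * y)) := by
  unfold times_table
  generalize PySem.List.pyRange 1 (n + 1) 1 = r
  have h : ∀ (xs acc : List _),
      xs.foldl (fun ls x => ls ++ [r.foldl (fun row y => row ++ [x * y]) []]) acc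
        = acc ++ xs.map (fun x => r.map (fun y => x * y)) := by
    intro xs
    induction xs with
    | nil => simp
    | cons x xs ih =>
      intro acc
      rw [List.foldl_cons, ih, foldl_snoc_map]
      simp
  simpa using h r []

lemma zip_add_step (base : List Int) (k : Int) :
    (base.map (fun b => k * b)).zipWith (fun p b => p + b) base
      = base.map (fun b => (k + 1) * b) := by
  induction base with
  | nil => rfl
  | cons b bs ih => simp [ih]; ring

lemma timesB_loop (base : List Int) (k : Nat) :
    ((PySem.List.pyRange 0 (k : Int) 1).foldl
      (fun (st : List (List Int) × List Int) _ =>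
        ((st.1 ++ [st.2.zipWith (fun p b => p + b) base]),
          st.2.zipWith (fun p b => p + b) base))
      ([], base.map (fun b => 0 * b)))
    = ((PySem.List.pyRange 1 ((k : Int) + 1) 1).map (fun x => base.map (fun b => x * b)),
        base.map (fun b => (k : Int) * b)) := by
  induction k with
  | zero => simp [PySem.List.pyRange_one_eq_nil]
  | succ m ih =>
    have h1 : PySem.List.pyRange 0 ((m + 1 : Nat) : Int) 1
        = PySem.List.pyRange 0 (m : Int) 1 ++ [(m : Int)] := by
      push_cast
      exact PySem.List.pyRange_one_succ_right (by omega)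
    have h2 : PySem.List.pyRange 1 (((m + 1 : Nat) : Int) + 1) 1
        = PySem.List.pyRange 1 ((m : Int) + 1) 1 ++ [(m : Int) + 1] := by
      push_cast
      exact PySem.List.pyRange_one_succ_right (by omega)
    rw [h1, List.foldl_append, ih, h2]
    simp only [List.foldl_cons, List.foldl_nil, zip_add_step]
    simp

-- ===== VERDICT (by name: the statement is the Claim_ definition above) =====
theorem times_table_spec : Claim_equal_times_table := by
  unfold Claim_equal_times_table
  intro n _
  unfold Spec_times_table times_table_alt
  by_cases hn : n ≤ 0
  · rw [timesA_eq]
    simp [PySem.List.pyRange_one_eq_nil (by omega : n + 1 ≤ 1),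
          PySem.List.pyRange_one_eq_nil (by omega : n ≤ 0)]
  · have hk : n = ((n.toNat : Nat) : Int) := by omega
    rw [timesA_eq]
    simp only []
    rw [hk]
    have := timesB_loop (PySem.List.pyRange 1 (((n.toNat : Nat) : Int) + 1) 1) n.toNat
    have hrepl : (PySem.List.pyRange 1 (((n.toNat : Nat) : Int) + 1) 1).map
        (fun b => (0 : Int) * b)
        = List.replicate (PySem.List.pyRange 1 (((n.toNat : Nat) : Int) + 1) 1).length 0 := by
      simp [List.map_const']
    rw [← hrepl, this]
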